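-- pv_equiv track=rewrite | github.com/exe-quiel/decision-variable-discreta | utils.py | calcular_savage
-- ===== SOURCE A (Python) =====
-- def cargar_matriz_valor(n_filas, n_columnas, valor=0):
--     matriz = []
--     for indice_fila in range(n_filas):
--         fila = []
--         for indice_columna in range(n_columnas):
--             fila.append(valor)
--         matriz.append(fila)
--     return matriz
--
-- def calcular_valores_max_fila(matriz):
--     '''
--     Recibe una matriz y devuelve una lista que contiene los valores máximos de cada fila
--     '''
--     #return [max(matriz[i]) for i in len(matriz)]
--     mayores = []
--     for i in range(len(matriz)):
--         mayores.append(max(matriz[i]))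
--     return mayores
--
-- def construir_matriz_arrepentimiento(matriz):
--     # Por cada estado (columna) de la matriz original,
--     # calculo el arrepentimiento para cada acción (fila)
--     # si se da ese estado
--     matriz_arrepentimiento = cargar_matriz_valor(len(matriz), len(matriz[0]))
--     for indice_columna in range(len(matriz[0])):
--         valores_columna = []
--         for fila in matriz:
--             valores_columna.append(fila[indice_columna])
--         valor_maximo_columna = max(valores_columna)
--         for indice_fila in range(len(valores_columna)):
--             valor_beneficio = valores_columna[indice_fila]
--             valor_arrepentimiento = valor_maximo_columna - valor_beneficio
--             matriz_arrepentimiento[indice_fila][indice_columna] = valor_arrepentimiento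
--     return matriz_arrepentimiento
--
-- def calcular_savage(matriz):
--     matriz_arrepentimiento = construir_matriz_arrepentimiento(matriz)
--     valores_max_fila = calcular_valores_max_fila(matriz_arrepentimiento)
--
--     menor = valores_max_fila[0]
--     #y_menores = [0]
--     y_menores = []
--     for y in range(len(valores_max_fila)):
--         if valores_max_fila[y] < menor:
--             menor = valores_max_fila[y]
--             y_menores.clear()
--             y_menores.append(y)
--         elif valores_max_fila[y] == menor:
--             y_menores.append(y)
--
--     celdas_menores = []
--     for y in range(len(matriz_arrepentimiento)):
--         for x in range(len(matriz_arrepentimiento[y])):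
--             if matriz_arrepentimiento[y][x] == menor:
--                 celdas_menores.append((x, y))
--
--     # matriz de arrepentimiento
--     # valores máximos de cada fila (matriz de arrepentimiento)
--     # valor minimax
--     # filas con el valor minimax (matriz de arrepentimiento)
--     # celdas de la matriz de arrepentimiento con el valor minimax
--     return matriz_arrepentimiento, valores_max_fila, menor, y_menores, celdas_menores
-- ===== SOURCE B (Python) =====
-- def calcular_savage(matriz):
--     # Running elementwise-maximum fold over the rows gives the column maxima in one
--     # row-major sweep; regret rows are built by zipping that vector with each row;
--     # the minimax value is the head of the sorted row-maxima list.
--     col_max = list(matriz[0])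
--     for fila in matriz[1:]:
--         col_max = [cm if cm >= v else v for cm, v in zip(col_max, fila)]
--     matriz_arrepentimiento = [[cm - v for cm, v in zip(col_max, fila)] for fila in matriz]
--     valores_max_fila = [max(fila) for fila in matriz_arrepentimiento]
--     menor = sorted(valores_max_fila)[0]
--     y_menores = [y for y in range(len(valores_max_fila)) if valores_max_fila[y] == menor]
--     celdas_menores = [(x, y) for y in range(len(matriz_arrepentimiento))
--                       for x in range(len(matriz_arrepentimiento[y]))
--                       if matriz_arrepentimiento[y][x] == menor]
--     return matriz_arrepentimiento, valores_max_fila, menor, y_menores, celdas_menores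
-- ===== Notes on version B (the rewrite author's own statement) =====
-- stated objective: alternative
-- what changed: B replaces A's column-major rescans and in-place mutation of a preallocated zero matrix by a running elementwise-maximum fold over the rows (one vector accumulator) to get the column maxima, builds the regret matrix by zipping that vector against each row, takes the minimax as the head of the sorted row-maxima list instead of A's running-min with clear-and-reappend index tracking, and derives the index/cell lists by filters over the finished data.
import Mathlib
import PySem

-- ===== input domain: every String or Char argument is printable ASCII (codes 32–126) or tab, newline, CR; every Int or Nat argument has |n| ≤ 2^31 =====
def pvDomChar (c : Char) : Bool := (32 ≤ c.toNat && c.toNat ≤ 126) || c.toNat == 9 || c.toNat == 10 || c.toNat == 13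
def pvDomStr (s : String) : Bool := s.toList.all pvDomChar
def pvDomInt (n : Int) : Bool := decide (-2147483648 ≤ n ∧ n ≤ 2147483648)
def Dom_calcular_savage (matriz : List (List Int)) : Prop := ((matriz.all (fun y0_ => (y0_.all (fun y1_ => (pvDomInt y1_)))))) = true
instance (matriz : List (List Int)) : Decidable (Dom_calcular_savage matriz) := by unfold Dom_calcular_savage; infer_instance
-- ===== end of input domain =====

-- B computes the column maxima by a running elementwise-maximum fold over the rows, builds the regret
-- matrix by zipping that vector with each row, and takes the minimax as the head of the sorted
-- row-maxima list, replacing A's column-major mutation of a preallocated zero matrix and its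
-- running-minimum tracking (objective: alternative decomposition, same cost).

-- Python max(xs) / min(xs) on a list of ints (Python raises on []; the [] default is never reached inside Pre_)
def pyMaxInt (xs : List Int) : Int := (PySem.List.max? xs (fun v => v)).getD 0

-- ===== PORT A =====
def cargar_matriz_valor (n_filas n_columnas : Int) (valor : Int) : List (List Int) :=
  (PySem.List.pyRange 0 n_filas).foldl
    (fun matriz _ =>
      matriz ++ [(PySem.List.pyRange 0 n_columnas).foldl (fun fila _ => fila ++ [valor]) []])
    []

-- matriz[i] here is always taken at 0 ≤ i < len (indices come from range(len)), where pyGetD is exact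
def calcular_valores_max_fila (matriz : List (List Int)) : List Int :=
  (PySem.List.pyRange 0 (matriz.length : Int)).foldl
    (fun mayores i => mayores ++ [pyMaxInt (PySem.List.pyGetD matriz i [])]) []

-- m[i][j] = v; i, j come from range(len) so 0 ≤ i, j — exact there
def pySetCell (m : List (List Int)) (i j : Int) (v : Int) : List (List Int) :=
  m.modify i.toNat (fun row => row.set j.toNat v)

def construir_matriz_arrepentimiento (matriz : List (List Int)) : List (List Int) :=
  (PySem.List.pyRange 0 ((PySem.List.pyGetD matriz 0 []).length : Int)).foldl
    (fun marr indice_columna =>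
      let valores_columna :=
        matriz.foldl (fun acc fila => acc ++ [PySem.List.pyGetD fila indice_columna 0]) []
      let valor_maximo_columna := pyMaxInt valores_columna
      (PySem.List.pyRange 0 (valores_columna.length : Int)).foldl
        (fun m indice_fila =>
          pySetCell m indice_fila indice_columna
            (valor_maximo_columna - PySem.List.pyGetD valores_columna indice_fila 0))
        marr)
    (cargar_matriz_valor (matriz.length : Int) ((PySem.List.pyGetD matriz 0 []).length : Int) 0)

def calcular_savage (matriz : List (List Int)) :
    List (List Int) × List Int × Int × List Int × (List (Int × Int)) :=
  let matriz_arrepentimiento := construir_matriz_arrepentimiento matriz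
  let valores_max_fila := calcular_valores_max_fila matriz_arrepentimiento
  let s := (PySem.List.pyRange 0 (valores_max_fila.length : Int)).foldl
    (fun (s : Int × List Int) y =>
      if PySem.List.pyGetD valores_max_fila y 0 < s.1 then
        (PySem.List.pyGetD valores_max_fila y 0, [y])
      else if PySem.List.pyGetD valores_max_fila y 0 = s.1 then (s.1, s.2 ++ [y])
      else s)
    (PySem.List.pyGetD valores_max_fila 0 0, [])
  let celdas_menores := (PySem.List.pyRange 0 (matriz_arrepentimiento.length : Int)).foldl
    (fun cs y =>
      (PySem.List.pyRange 0 ((PySem.List.pyGetD matriz_arrepentimiento y []).length : Int)).foldl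
        (fun cs x =>
          if PySem.List.pyGetD (PySem.List.pyGetD matriz_arrepentimiento y []) x 0 = s.1 then
            cs ++ [(x, y)]
          else cs)
        cs)
    []
  (matriz_arrepentimiento, valores_max_fila, s.1, s.2, celdas_menores)

-- ===== PORT B =====
-- col_max = list(matriz[0]); for fila in matriz[1:]: col_max = [cm if cm >= v else v for cm, v in zip(col_max, fila)]
def calcular_savage_alt (matriz : List (List Int)) :
    List (List Int) × List Int × Int × List Int × (List (Int × Int)) :=
  let col_max := (matriz.drop 1).foldl
    (fun cm fila => (List.zip cm fila).map (fun p => if p.2 ≤ p.1 then p.1 else p.2))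
    (PySem.List.pyGetD matriz 0 [])
  let matriz_arrepentimiento :=
    matriz.map (fun fila => (List.zip col_max fila).map (fun p => p.1 - p.2))
  let valores_max_fila := matriz_arrepentimiento.map pyMaxInt
  let menor := PySem.List.pyGetD (PySem.List.sorted valores_max_fila (fun v => v) false) 0 0
  let y_menores := ((List.range valores_max_fila.length).filter
      (fun (y : Nat) => PySem.List.pyGetD valores_max_fila (y : Int) 0 == menor)).map
    (fun (y : Nat) => (y : Int))
  let celdas_menores := (List.range matriz_arrepentimiento.length).flatMap
    (fun (y : Nat) =>
      ((List.range (PySem.List.pyGetD matriz_arrepentimiento (y : Int) []).length).filter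
          (fun (x : Nat) =>
            PySem.List.pyGetD (PySem.List.pyGetD matriz_arrepentimiento (y : Int) []) (x : Int) 0
              == menor)).map
        (fun (x : Nat) => ((x : Int), (y : Int))))
  (matriz_arrepentimiento, valores_max_fila, menor, y_menores, celdas_menores)

-- ===== PRECONDITION & SPEC =====
-- Pre_ excludes exactly the inputs where Python A raises: the empty matrix / an empty first row
-- (max() of an empty sequence, matriz[0] IndexError) and rows shorter than the first row (IndexError).
def Pre_calcular_savage (matriz : List (List Int)) : Prop :=
  matriz ≠ [] ∧ 0 < (matriz.headD []).length ∧
    ∀ fila ∈ matriz, (matriz.headD []).length ≤ fila.length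
instance (matriz : List (List Int)) : Decidable (Pre_calcular_savage matriz) := by
  unfold Pre_calcular_savage; infer_instance
def pvWitness_calcular_savage : List (List Int) := [[1, 2], [3, 0]]

def Spec_calcular_savage (matriz : List (List Int)) (out : List (List Int) × List Int × Int × List Int × (List (Int × Int))) : Prop := out = calcular_savage_alt matriz
instance (matriz : List (List Int)) (out : List (List Int) × List Int × Int × List Int × (List (Int × Int))) : Decidable (Spec_calcular_savage matriz out) := by unfold Spec_calcular_savage; infer_instance

-- ===== CLAIM (what is proved, stated in full; the proofs are below) =====
def Claim_equal_calcular_savage : Prop := ∀ (matriz : List (List Int)), Dom_calcular_savage matriz → Pre_calcular_savage matriz → Spec_calcular_savage matriz (calcular_savage matriz)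

-- ===== LEMMAS AND PROOFS =====

-- Python min(xs) value (proof-side abbreviation)
def pyMinInt (xs : List Int) : Int := (PySem.List.min? xs (fun v => v)).getD 0

def colA (matriz : List (List Int)) (j : Int) : List Int :=
  matriz.map (fun fila => PySem.List.pyGetD fila j 0)
def rA (matriz : List (List Int)) (i x : Nat) : Int :=
  pyMaxInt (colA matriz x) - PySem.List.pyGetD (colA matriz x) i 0

theorem setloop (j : Nat) (f : Nat → Int) (k : Nat) (m : List (List Int)) (hk : k ≤ m.length) :
    (List.range k).foldl (fun m i => m.modify i (fun row => row.set j (f i))) m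
    = m.mapIdx (fun i row => if i < k then row.set j (f i) else row) := by
  induction k with
  | zero =>
    apply List.ext_getElem <;> simp
  | succ k ih =>
    rw [List.range_succ, List.foldl_append, ih (by omega)]
    simp only [List.foldl_cons, List.foldl_nil]
    apply List.ext_getElem
    · simp
    · intro i h1 h2
      simp only [List.getElem_modify, List.getElem_mapIdx]
      split_ifs <;> simp_all <;> omega

theorem colpass (matriz : List (List Int)) (c : Nat) (k : Nat) (hk : k ≤ c) :
    (List.range k).foldl
      (fun marr j =>
        (List.range matriz.length).foldl
          (fun m i => m.modify i (fun row =>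
            row.set j (pyMaxInt (colA matriz j) - PySem.List.pyGetD (colA matriz j) i 0))) marr)
      (List.replicate matriz.length (List.replicate c 0))
    = (List.range matriz.length).map (fun i =>
        (List.range c).map (fun x => if x < k then rA matriz i x else 0)) := by
  induction k with
  | zero => simp [List.map_const']
  | succ k ih =>
    rw [List.range_succ, List.foldl_append, ih (by omega), List.foldl_cons, List.foldl_nil]
    set M := (List.range matriz.length).map (fun i =>
        (List.range c).map (fun x => if x < k then rA matriz i x else 0)) with hM
    have hlen : M.length = matriz.length := by simp [hM]
    rw [← hlen, setloop _ _ _ _ (le_refl _)]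
    apply List.ext_getElem
    · simp [hM]
    · intro i h1 h2
      have h1' : i < matriz.length := by simpa [hM] using h1
      simp only [List.getElem_mapIdx, hM, List.getElem_map, List.getElem_range,
        List.length_map, List.length_range, h1', if_true]
      apply List.ext_getElem
      · simp
      · intro x hx1 hx2
        rw [List.getElem_set]
        simp only [List.getElem_map, List.getElem_range]
        rcases Nat.lt_trichotomy x k with h | h | h
        · rw [if_neg (by omega), if_pos (by omega), if_pos (by omega)]
        · subst h
          rw [if_pos rfl, if_pos (by omega)]
          simp [rA]
        · rw [if_neg (by omega), if_neg (by omega), if_neg (by omega)]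

theorem cargar_eq (n c : Nat) :
    cargar_matriz_valor (n : Int) (c : Int) 0 = List.replicate n (List.replicate c 0) := by
  unfold cargar_matriz_valor
  simp [PySem.List.pyRange_zero_natCast, List.foldl_map, List.map_const']

theorem construir_eq (matriz : List (List Int)) :
    construir_matriz_arrepentimiento matriz
    = (List.range matriz.length).map (fun i =>
        (List.range (PySem.List.pyGetD matriz 0 []).length).map (fun x => rA matriz i x)) := by
  unfold construir_matriz_arrepentimiento
  rw [cargar_eq]
  simp only [PySem.List.pyRange_zero_natCast, List.foldl_map,
    PySem.List.foldl_append_singleton_eq_map, List.nil_append, pySetCell,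
    Int.toNat_natCast, List.length_map]
  show (List.range (PySem.List.pyGetD matriz 0 []).length).foldl
      (fun marr j =>
        (List.range matriz.length).foldl
          (fun m i => m.modify i (fun row =>
            row.set j (pyMaxInt (colA matriz j) - PySem.List.pyGetD (colA matriz j) i 0))) marr)
      (List.replicate matriz.length (List.replicate (PySem.List.pyGetD matriz 0 []).length 0)) = _
  rw [colpass matriz _ _ (le_refl _)]
  apply List.map_congr_left
  intro i _
  apply List.map_congr_left
  intro x hx
  rw [if_pos (List.mem_range.mp hx)]

theorem mapRange_getD {α β : Type} (xs : List α) (g : α → β) (d : α) :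
    (List.range xs.length).map (fun i => g (xs.getD i d)) = xs.map g := by
  apply List.ext_getElem
  · simp
  · intro i h1 h2
    simp [List.getD_eq_getElem?_getD, List.getElem?_eq_getElem (by simpa using h1 : i < xs.length)]

theorem valmax_eq (m : List (List Int)) :
    calcular_valores_max_fila m = m.map pyMaxInt := by
  unfold calcular_valores_max_fila
  simp only [PySem.List.pyRange_zero_natCast, List.foldl_map,
    PySem.List.foldl_append_singleton_eq_map, List.nil_append, PySem.List.pyGetD_natCast]
  exact mapRange_getD m pyMaxInt []

theorem minloop_inv (xs : List Int) (k : Nat) (hk : k ≤ xs.length) :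
    (List.range k).foldl
      (fun (s : Int × List Int) (y : Nat) =>
        if PySem.List.pyGetD xs (y : Int) 0 < s.1 then (PySem.List.pyGetD xs (y : Int) 0, [(y : Int)])
        else if PySem.List.pyGetD xs (y : Int) 0 = s.1 then (s.1, s.2 ++ [(y : Int)]) else s)
      (PySem.List.pyGetD xs 0 0, [])
    = ((xs.take k).foldl min (PySem.List.pyGetD xs 0 0),
       ((List.range k).filter
          (fun y => xs.getD y 0 == (xs.take k).foldl min (PySem.List.pyGetD xs 0 0))).map
         (fun y => Int.ofNat y)) := by
  induction k with
  | zero => simp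
  | succ k ih =>
    have hk' : k < xs.length := by omega
    have hv : PySem.List.pyGetD xs (k : Int) 0 = xs[k] := by
      rw [PySem.List.pyGetD_natCast, List.getD_eq_getElem?_getD,
        List.getElem?_eq_getElem hk']
      rfl
    have htake : (xs.take (k+1)).foldl min (PySem.List.pyGetD xs 0 0)
        = min ((xs.take k).foldl min (PySem.List.pyGetD xs 0 0)) xs[k] := by
      rw [List.take_succ_eq_append_getElem hk', List.foldl_append]
      rfl
    have hlb : ∀ y : Nat, y < k → (xs.take k).foldl min (PySem.List.pyGetD xs 0 0) ≤ xs.getD y 0 := by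
      intro y hy
      have hyl : y < xs.length := by omega
      have hmem : xs.getD y 0 ∈ xs.take k := by
        rw [List.getD_eq_getElem?_getD, List.getElem?_eq_getElem hyl]
        exact List.mem_take_iff_getElem.mpr ⟨y, by omega, by simp⟩
      exact (PySem.List.foldl_min_le _ _).2 _ hmem
    rw [List.range_succ, List.foldl_append, ih (by omega), List.foldl_cons, List.foldl_nil]
    set m := (xs.take k).foldl min (PySem.List.pyGetD xs 0 0) with hm
    rcases lt_trichotomy xs[k] m with h | h | h
    · rw [if_pos (by rw [hv]; exact h)]
      rw [htake, min_eq_right (le_of_lt h)]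
      rw [List.filter_append]
      have h1 : (List.range k).filter (fun y => xs.getD y 0 == xs[k]) = [] := by
        apply List.filter_eq_nil_iff.mpr
        intro y hy
        have := hlb y (List.mem_range.mp hy)
        simp only [beq_iff_eq, ne_eq]
        intro hEq
        omega
      have h2 : [k].filter (fun y => xs.getD y 0 == xs[k]) = [k] := by
        simp [List.getD_eq_getElem?_getD, List.getElem?_eq_getElem hk']
      rw [h1, h2]
      simp [hv]
    · rw [if_neg (by rw [hv, h]; exact lt_irrefl _), if_pos (by rw [hv, h])]
      rw [htake, h, min_self]
      rw [List.filter_append]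
      have h2 : [k].filter (fun y => xs.getD y 0 == m) = [k] := by
        simp [List.getD_eq_getElem?_getD, List.getElem?_eq_getElem hk', h]
      rw [h2, List.map_append]
      simp
    · rw [if_neg (by rw [hv]; omega), if_neg (by rw [hv]; omega)]
      rw [htake, min_eq_left (le_of_lt h)]
      rw [List.filter_append]
      have h2 : [k].filter (fun y => xs.getD y 0 == m) = [] := by
        simp only [List.filter_cons, List.filter_nil]
        rw [if_neg]
        simp only [beq_iff_eq, List.getD_eq_getElem?_getD, List.getElem?_eq_getElem hk']
        intro hEq
        simp at hEq
        omega
      rw [h2, List.append_nil]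

theorem minfinal (xs : List Int) :
    (xs.take xs.length).foldl min (PySem.List.pyGetD xs 0 0) = pyMinInt xs := by
  cases xs with
  | nil => simp [pyMinInt, PySem.List.min?, PySem.List.pyGetD, PySem.List.pyGet?]
  | cons x t =>
    rw [List.take_length]
    have h0 : PySem.List.pyGetD (x :: t) 0 0 = x := by
      simp [PySem.List.pyGetD, PySem.List.pyGet?, PySem.List.pyIdx?]
    rw [h0, List.foldl_cons, min_self, pyMinInt, PySem.List.min?_id_cons]
    rfl

-- head of sorted(xs) is the minimum value of a nonempty xs
theorem sortedHead (xs : List Int) (h : xs ≠ []) :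
    PySem.List.pyGetD (PySem.List.sorted xs (fun v => v) false) 0 0 = pyMinInt xs := by
  rcases hs : PySem.List.sorted xs (fun v => v) false with _ | ⟨m, t⟩
  · exact absurd ((PySem.List.sorted_eq_nil_iff _ _ _).mp hs) h
  · have hm : m ∈ xs := by
      have := (PySem.List.sorted_perm xs (fun v => v) false).mem_iff (a := m)
      rw [hs] at this
      exact this.mp (by simp)
    have hlow : ∀ y ∈ xs, m ≤ y := PySem.List.key_head_sorted_le xs (fun v => v) hs
    rcases xs with _ | ⟨x, t'⟩
    · exact absurd rfl h
    · have h0 : PySem.List.pyGetD (m :: t) 0 0 = m := by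
        simp [PySem.List.pyGetD, PySem.List.pyGet?, PySem.List.pyIdx?]
      rw [h0, pyMinInt, PySem.List.min?_id_cons]
      have hmin_mem : t'.foldl min x ∈ x :: t' := by
        rcases PySem.List.foldl_min_mem t' x with h' | h'
        · rw [h']; exact List.mem_cons_self
        · exact List.mem_cons_of_mem _ h'
      have hmin_le : t'.foldl min x ≤ m := by
        rcases List.mem_cons.mp hm with h' | h'
        · rw [h']; exact (PySem.List.foldl_min_le _ _).1
        · exact (PySem.List.foldl_min_le _ _).2 _ h'
      exact le_antisymm (hlow _ hmin_mem) hmin_le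

theorem enumerate_cons {α : Type} (x : α) (t : List α) (k : Int) :
    PySem.List.enumerate (x :: t) k = (k, x) :: PySem.List.enumerate t (k+1) := by
  simp [PySem.List.enumerate]

theorem enumFilter (xs : List Int) (m : Int) (k : Int) :
    ((PySem.List.enumerate xs k).filter (fun p => p.2 == m)).map (fun p => p.1)
    = ((List.range xs.length).filter (fun y => xs.getD y 0 == m)).map (fun y => k + Int.ofNat y) := by
  induction xs generalizing k with
  | nil => simp [PySem.List.enumerate]
  | cons x t ih =>
    rw [enumerate_cons]
    simp only [List.length_cons, List.range_succ_eq_map, List.filter_cons, List.filter_map,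
      List.getD_cons_zero, List.getD_cons_succ, Function.comp_def]
    split_ifs with h
    · simp only [List.map_cons, List.map_map, Function.comp_def]
      rw [ih (k+1)]
      congr 1
      · simp
      · apply List.map_congr_left
        intro y _
        simp only [Int.ofNat_eq_natCast]
        push_cast
        ring
    · simp only [List.map_map, Function.comp_def]
      rw [ih (k+1)]
      apply List.map_congr_left
      intro y _
      simp only [Int.ofNat_eq_natCast]
      push_cast
      ring

theorem enumFilterPair (row : List Int) (m : Int) (yv : Int) :
    ((PySem.List.enumerate row).filter (fun q => q.2 == m)).map (fun q => (q.1, yv))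
    = ((List.range row.length).filter (fun x => row.getD x 0 == m)).map
        (fun x => (Int.ofNat x, yv)) := by
  rw [show (fun (q : Int × Int) => (q.1, yv)) = ((fun a => (a, yv)) ∘ (fun q : Int × Int => q.1)) from rfl]
  rw [← List.map_map, enumFilter row m 0, List.map_map]
  apply List.map_congr_left
  intro x _
  simp

theorem enumFlat (rows : List (List Int)) (m : Int) (k : Int) :
    (PySem.List.enumerate rows k).flatMap
      (fun py => ((PySem.List.enumerate py.2).filter (fun q => q.2 == m)).map (fun q => (q.1, py.1)))
    = (List.range rows.length).flatMap
        (fun y => (((List.range (rows.getD y []).length).filter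
            (fun x => (rows.getD y []).getD x 0 == m)).map
              (fun x => (Int.ofNat x, k + Int.ofNat y)))) := by
  induction rows generalizing k with
  | nil => simp [PySem.List.enumerate]
  | cons row rest ih =>
    rw [enumerate_cons]
    simp only [List.flatMap_cons, List.length_cons, List.range_succ_eq_map]
    rw [enumFilterPair, ih (k+1)]
    congr 1
    · apply List.map_congr_left
      intro x _
      simp
    · rw [List.flatMap_map]
      apply List.flatMap_congr
      intro y _
      simp only [List.getD_cons_succ]
      apply List.map_congr_left
      intro x _
      simp only [Int.ofNat_eq_natCast, Prod.mk.injEq, true_and]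
      push_cast
      ring

theorem iteEq {α : Type} (a b : Int) (X Y : α) :
    (if a = b then X else Y) = (if (a == b) = true then X else Y) := by
  by_cases h : a = b <;> simp [h]

theorem celdas_eq (rows : List (List Int)) (m : Int) :
    (PySem.List.pyRange 0 (rows.length : Int)).foldl
      (fun cs y =>
        (PySem.List.pyRange 0 ((PySem.List.pyGetD rows y []).length : Int)).foldl
          (fun cs x =>
            if PySem.List.pyGetD (PySem.List.pyGetD rows y []) x 0 = m then cs ++ [(x, y)] else cs)
          cs)
      ([] : List (Int × Int))
    = (List.range rows.length).flatMap
        (fun y => (((List.range (rows.getD y []).length).filter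
            (fun x => (rows.getD y []).getD x 0 == m)).map
              (fun x => (Int.ofNat x, Int.ofNat y)))) := by
  have := enumFlat rows m 0
  simp only [zero_add] at this
  rw [← this, PySem.List.pyRange_zero_natCast, List.foldl_map]
  simp only [PySem.List.pyRange_zero_natCast, List.foldl_map, iteEq,
    PySem.List.foldl_append_if, PySem.List.pyGetD_natCast]
  simp only [PySem.List.foldl_append_eq_flatMap, List.nil_append]
  rw [enumFlat rows m 0]
  apply List.flatMap_congr
  intro y _
  apply List.map_congr_left
  intro x _
  simp

-- the running elementwise-maximum fold computed pointwise
theorem colfold (rows : List (List Int)) (cm : List Int)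
    (h : ∀ r ∈ rows, cm.length ≤ r.length) :
    rows.foldl (fun cm fila => (List.zip cm fila).map (fun p => if p.2 ≤ p.1 then p.1 else p.2)) cm
    = (List.range cm.length).map
        (fun j => rows.foldl (fun a r => max a (r.getD j 0)) (cm.getD j 0)) := by
  induction rows generalizing cm with
  | nil =>
    simp only [List.foldl_nil]
    have h1 : (List.range cm.length).map (fun i => cm.getD i 0) = cm := by
      simpa using mapRange_getD cm (fun x => x) 0
    exact h1.symm
  | cons r rs ih =>
    have hr : cm.length ≤ r.length := h r List.mem_cons_self
    have hlen : ((List.zip cm r).map (fun p => if p.2 ≤ p.1 then p.1 else p.2)).length = cm.length := by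
      simp [List.length_zip]; omega
    rw [List.foldl_cons, ih _ (by intro r' hr'; rw [hlen]; exact h r' (List.mem_cons_of_mem _ hr'))]
    rw [hlen]
    apply List.map_congr_left
    intro j hj
    have hjc : j < cm.length := List.mem_range.mp hj
    have hjr : j < r.length := by omega
    have hstep : ((List.zip cm r).map (fun p => if p.2 ≤ p.1 then p.1 else p.2)).getD j 0
        = max (cm.getD j 0) (r.getD j 0) := by
      rw [List.getD_eq_getElem?_getD,
        List.getElem?_eq_getElem (by simp [List.length_zip]; omega)]
      simp only [List.getElem_map, List.getElem_zip, Option.getD_some]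
      rw [List.getD_eq_getElem?_getD, List.getElem?_eq_getElem hjc,
        List.getD_eq_getElem?_getD, List.getElem?_eq_getElem hjr]
      simp only [Option.getD_some]
      rcases le_or_gt r[j] cm[j] with h' | h'
      · rw [if_pos h', max_eq_left h']
      · rw [if_neg (by omega), max_eq_right (le_of_lt h')]
    rw [hstep, List.foldl_cons]

-- pyMaxInt of a column as the running max over the remaining rows
theorem colmax_as_fold (r0 : List Int) (rest : List (List Int)) (j : Nat) :
    pyMaxInt (colA (r0 :: rest) (j : Int))
    = rest.foldl (fun a r => max a (r.getD j 0)) (r0.getD j 0) := by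
  unfold colA pyMaxInt
  simp only [List.map_cons]
  rw [PySem.List.max?_id_cons]
  simp only [Option.getD_some, List.foldl_map]
  congr 1
  · funext a r
    rw [PySem.List.pyGetD_natCast]
  · rw [PySem.List.pyGetD_natCast]

theorem ports_eq (matriz : List (List Int)) (hpre : Pre_calcular_savage matriz) :
    calcular_savage matriz = calcular_savage_alt matriz := by
  obtain ⟨hne, hpos, hlens⟩ := hpre
  rcases hm : matriz with _ | ⟨r0, rest⟩
  · exact absurd hm hne
  subst hm
  simp only [List.headD_cons] at hpos hlens
  -- the shared regret matrix
  have hget0 : PySem.List.pyGetD (r0 :: rest) 0 [] = r0 := by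
    simp [PySem.List.pyGetD, PySem.List.pyGet?, PySem.List.pyIdx?]
  have hcm : (rest.foldl
      (fun cm fila => (List.zip cm fila).map (fun p => if p.2 ≤ p.1 then p.1 else p.2)) r0)
      = (List.range r0.length).map (fun (j : Nat) => pyMaxInt (colA (r0 :: rest) (j : Int))) := by
    rw [colfold rest r0 (fun r hr => hlens r (List.mem_cons_of_mem _ hr))]
    apply List.map_congr_left
    intro j _
    rw [colmax_as_fold r0 rest j]
  have hmarr : construir_matriz_arrepentimiento (r0 :: rest)
      = (r0 :: rest).map (fun fila =>
          (List.zip ((List.range r0.length).map (fun (j : Nat) => pyMaxInt (colA (r0 :: rest) (j : Int)))) fila).map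
            (fun p => p.1 - p.2)) := by
    rw [construir_eq, hget0]
    apply List.ext_getElem
    · simp
    · intro i h1 h2
      have hi : i < (r0 :: rest).length := by simpa using h1
      simp only [List.getElem_map, List.getElem_range]
      apply List.ext_getElem
      · have := hlens ((r0 :: rest)[i]) (List.getElem_mem hi)
        simp [List.length_zip]
        omega
      · intro x hx1 hx2
        have hx : x < r0.length := by simpa using hx1
        simp only [List.getElem_map, List.getElem_range, List.getElem_zip]
        unfold rA
        congr 1
        unfold colA
        rw [PySem.List.pyGetD_natCast ((r0 :: rest).map _) i 0,
          List.getD_eq_getElem?_getD, List.getElem?_map, List.getElem?_eq_getElem hi]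
        simp only [Option.map_some, Option.getD_some]
        have hxlen : x < ((r0 :: rest)[i]).length := by
          have := hlens ((r0 :: rest)[i]) (List.getElem_mem hi)
          omega
        rw [PySem.List.pyGetD_natCast, List.getD_eq_getElem?_getD,
          List.getElem?_eq_getElem hxlen]
        rfl
  -- now assemble
  unfold calcular_savage calcular_savage_alt
  simp only [List.drop_succ_cons, List.drop_zero, hget0, hcm, ← hmarr, valmax_eq]
  set marr := construir_matriz_arrepentimiento (r0 :: rest) with hmarrdef
  set vmax := marr.map pyMaxInt with hvmax
  have hvne : vmax ≠ [] := by
    rw [hvmax, hmarr]; simp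
  -- minimum + y_menores
  have hmin : (PySem.List.pyRange 0 (vmax.length : Int)).foldl
      (fun (s : Int × List Int) y =>
        if PySem.List.pyGetD vmax y 0 < s.1 then (PySem.List.pyGetD vmax y 0, [y])
        else if PySem.List.pyGetD vmax y 0 = s.1 then (s.1, s.2 ++ [y]) else s)
      (PySem.List.pyGetD vmax 0 0, [])
      = (pyMinInt vmax,
         ((List.range vmax.length).filter (fun y => vmax.getD y 0 == pyMinInt vmax)).map
           (fun y => Int.ofNat y)) := by
    rw [PySem.List.pyRange_zero_natCast, List.foldl_map,
      minloop_inv vmax vmax.length (le_refl _), minfinal]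
  rw [hmin, celdas_eq]
  rw [sortedHead vmax hvne]
  simp only [Prod.mk.injEq, Int.ofNat_eq_natCast]
  refine ⟨by trivial, by trivial, by trivial, ?_, ?_⟩
  · apply congrArg
    apply List.filter_congr
    intro y hy
    rw [PySem.List.pyGetD_natCast]
  · apply List.flatMap_congr
    intro y hy
    rw [PySem.List.pyGetD_natCast]
    apply congrArg
    apply List.filter_congr
    intro x hx
    rw [PySem.List.pyGetD_natCast]

-- ===== VERDICT (by name: the statement is the Claim_ definition above) =====
theorem calcular_savage_spec : Claim_equal_calcular_savage := by
  intro matriz _ hpre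
  unfold Spec_calcular_savage
  exact ports_eq matriz hpre
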